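-- pv_equiv track=rewrite | github.com/okaditya84/ModularForge | scripts/prepare_data.py | _extract_articles
-- ===== SOURCE A (Python) =====
-- def _extract_articles(raw_texts: list[str], min_length: int) -> list[str]:
--     """
--     Extract clean articles from WikiText raw format.
--
--     WikiText-103 stores text line-by-line with article headers like
--     "= Title =" and empty lines between sections. We concatenate
--     consecutive content lines into articles.
--
--     Parameters
--     ----------
--     raw_texts : list[str]
--         Raw lines from the dataset.
--     min_length : int
--         Minimum character length for an article.
--
--     Returns
--     -------
--     list[str]
--         Clean articles.
--     """
--     articles = []
--     current_article = []
--
--     for line in raw_texts: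
--         line = line.strip()
--
--         if not line:
--             # Empty line — end of article section
--             if current_article:
--                 article_text = " ".join(current_article)
--                 if len(article_text) >= min_length:
--                     articles.append(article_text)
--                 current_article = []
--         elif line.startswith("=") and line.endswith("="):
--             # Article header — start new article
--             if current_article:
--                 article_text = " ".join(current_article)
--                 if len(article_text) >= min_length:
--                     articles.append(article_text)
--                 current_article = []
--         else:
--             current_article.append(line)
--
--     # Don't forget the last article
--     if current_article:
--         article_text = " ".join(current_article)
--         if len(article_text) >= min_length:
--             articles.append(article_text)
--
--     return articles
-- ===== SOURCE B (Python) =====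
-- def _extract_articles(raw_texts: list[str], min_length: int) -> list[str]:
--     # Index-based segmentation: precompute delimiter positions, then slice
--     # the segments between consecutive delimiters out of the stripped lines.
--     stripped = [line.strip() for line in raw_texts]
--     n = len(stripped)
--     bounds = [i for i, s in enumerate(stripped)
--               if not s or (s.startswith("=") and s.endswith("="))]
--     articles = []
--     prev = 0
--     for b in bounds + [n]:
--         seg = stripped[prev:b]
--         if seg:
--             text = " ".join(seg)
--             if len(text) >= min_length:
--                 articles.append(text)
--         prev = b + 1
--     return articles
-- ===== Notes on version B (the rewrite author's own statement) =====
-- stated objective: alternative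
-- what changed: B replaces A's single-pass state machine (running current_article accumulator flushed at every boundary) with index-based segmentation: it precomputes the list of delimiter positions over the stripped lines and then slices each segment between consecutive delimiters, joining and length-filtering each non-empty slice.
import Mathlib
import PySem

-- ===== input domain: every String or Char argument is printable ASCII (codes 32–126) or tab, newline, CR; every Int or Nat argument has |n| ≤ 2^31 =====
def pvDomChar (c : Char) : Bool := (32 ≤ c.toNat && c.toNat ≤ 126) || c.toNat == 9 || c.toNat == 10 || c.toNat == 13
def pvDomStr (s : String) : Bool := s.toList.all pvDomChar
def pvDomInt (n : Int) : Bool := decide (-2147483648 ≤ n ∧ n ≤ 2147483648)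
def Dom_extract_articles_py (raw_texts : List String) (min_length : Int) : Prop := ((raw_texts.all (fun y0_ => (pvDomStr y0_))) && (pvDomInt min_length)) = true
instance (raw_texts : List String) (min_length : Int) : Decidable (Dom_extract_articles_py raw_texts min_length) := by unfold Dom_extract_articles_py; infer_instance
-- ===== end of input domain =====

-- B replaces A's running-accumulator state machine with index-based segmentation (precomputed delimiter positions + slicing); alternative decomposition, same behaviour.


-- ===== PORT A =====
-- One step of A's for-loop over the state (articles, current_article)
def pvStepA (min_length : Int) (st : List String × List String) (line : String) : List String × List String :=
  let l := PySem.Str.strip line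
  if l = "" then
    if st.2 ≠ [] then
      let t := PySem.Str.join " " st.2
      (if min_length ≤ PySem.Str.len t then st.1 ++ [t] else st.1, [])
    else st
  else if PySem.Str.startswith l "=" && PySem.Str.endswith l "=" then
    if st.2 ≠ [] then
      let t := PySem.Str.join " " st.2
      (if min_length ≤ PySem.Str.len t then st.1 ++ [t] else st.1, [])
    else st
  else (st.1, st.2 ++ [l])

def extract_articles_py (raw_texts : List String) (min_length : Int) : List String :=
  let st := raw_texts.foldl (pvStepA min_length) ([], [])
  if st.2 ≠ [] then
    let t := PySem.Str.join " " st.2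
    if min_length ≤ PySem.Str.len t then st.1 ++ [t] else st.1
  else st.1

-- ===== PORT B =====
-- the delimiter predicate of B's comprehension: blank or '='-header (applied to an already-stripped line)
def pvDelimS (s : String) : Bool :=
  s == "" || (PySem.Str.startswith s "=" && PySem.Str.endswith s "=")

-- one step of B's for-loop over (articles, prev), b the next boundary
def pvSegStep (stripped : List String) (min_length : Int)
    (st : List String × Int) (b : Int) : List String × Int :=
  let seg := PySem.List.slice stripped (some st.2) (some b)
  if seg ≠ [] then
    let t := PySem.Str.join " " seg
    ((if min_length ≤ PySem.Str.len t then st.1 ++ [t] else st.1), b + 1)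
  else (st.1, b + 1)

def extract_articles_py_alt (raw_texts : List String) (min_length : Int) : List String :=
  let stripped := raw_texts.map PySem.Str.strip
  let n : Int := stripped.length
  let bounds := ((PySem.List.enumerate stripped 0).filter (fun p => pvDelimS p.2)).map (fun p => p.1)
  ((bounds ++ [n]).foldl (pvSegStep stripped min_length) ([], 0)).1

-- ===== PRECONDITION & SPEC =====
def Spec_extract_articles_py (raw_texts : List String) (min_length : Int) (out : List String) : Prop := out = extract_articles_py_alt raw_texts min_length
instance (raw_texts : List String) (min_length : Int) (out : List String) : Decidable (Spec_extract_articles_py raw_texts min_length out) := by unfold Spec_extract_articles_py; infer_instance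

-- ===== CLAIM (what is proved, stated in full; the proofs are below) =====
def Claim_equal_extract_articles_py : Prop := ∀ (raw_texts : List String) (min_length : Int), Dom_extract_articles_py raw_texts min_length → Spec_extract_articles_py raw_texts min_length (extract_articles_py raw_texts min_length)

-- ===== LEMMAS AND PROOFS =====

-- reference grouping of stripped lines into articles (proof-side only)
def pvGrp : List String → List String → List (List String)
  | cur, [] => if cur = [] then [] else [cur]
  | cur, s :: rest =>
    if pvDelimS s then (if cur = [] then pvGrp [] rest else cur :: pvGrp [] rest)
    else pvGrp (cur ++ [s]) rest

-- what one group contributes to the output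
def pvEmit (min_length : Int) (g : List String) : List String :=
  if min_length ≤ PySem.Str.len (PySem.Str.join " " g) then [PySem.Str.join " " g] else []

-- delimiter indices of xs starting at offset k (proof-side)
def pvDIdx : List String → Nat → List Int
  | [], _ => []
  | s :: rest, k => if pvDelimS s then (k : Int) :: pvDIdx rest (k + 1) else pvDIdx rest (k + 1)

-- A's final flush
def pvFlushA (min_length : Int) (st : List String × List String) : List String :=
  if st.2 ≠ [] then
    let t := PySem.Str.join " " st.2
    if min_length ≤ PySem.Str.len t then st.1 ++ [t] else st.1
  else st.1

theorem stepA_true (m : Int) (acc cur : List String) (l : String) (h : pvDelimS (PySem.Str.strip l) = true) :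
    pvStepA m (acc, cur) l
      = if cur = [] then (acc, cur)
        else ((if m ≤ PySem.Str.len (PySem.Str.join " " cur) then acc ++ [PySem.Str.join " " cur] else acc), ([] : List String)) := by
  simp only [pvStepA]
  by_cases he : PySem.Str.strip l = ""
  · rw [if_pos he]
    by_cases hc : cur = [] <;> simp [hc]
  · have hb : (PySem.Str.startswith (PySem.Str.strip l) "=" && PySem.Str.endswith (PySem.Str.strip l) "=") = true := by
      simp only [pvDelimS, Bool.or_eq_true, beq_iff_eq] at h
      tauto
    rw [if_neg he, if_pos hb]
    by_cases hc : cur = [] <;> simp [hc]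

theorem stepA_false (m : Int) (acc cur : List String) (l : String) (h : pvDelimS (PySem.Str.strip l) = false) :
    pvStepA m (acc, cur) l = (acc, cur ++ [PySem.Str.strip l]) := by
  simp only [pvDelimS, Bool.or_eq_false_iff, Bool.and_eq_false_iff, beq_eq_false_iff_ne, ne_eq] at h
  obtain ⟨he, hb⟩ := h
  have h' : ¬((PySem.Str.startswith (PySem.Str.strip l) "=" && PySem.Str.endswith (PySem.Str.strip l) "=") = true) := by
    intro hcond
    rw [Bool.and_eq_true] at hcond
    rcases hb with hb | hb
    · rw [hcond.1] at hb; cases hb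
    · rw [hcond.2] at hb; cases hb
  simp only [pvStepA]
  rw [if_neg he, if_neg h']

-- A = acc ++ emitted groups of the reference grouping
theorem pvA_grp (m : Int) (lines : List String) (acc cur : List String) :
    pvFlushA m (lines.foldl (pvStepA m) (acc, cur))
      = acc ++ (pvGrp cur (lines.map PySem.Str.strip)).flatMap (pvEmit m) := by
  induction lines generalizing acc cur with
  | nil =>
    by_cases hc : cur = []
    · simp [pvFlushA, pvGrp, hc]
    · simp [pvFlushA, pvGrp, hc, pvEmit]
      split_ifs <;> simp
  | cons l rest ih =>
    simp only [List.foldl_cons, List.map_cons]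
    cases hd : pvDelimS (PySem.Str.strip l) with
    | true =>
      rw [stepA_true m acc cur l hd]
      by_cases hc : cur = []
      · subst hc
        rw [if_pos rfl]
        simpa [pvGrp, hd] using ih acc []
      · rw [if_neg hc, ih]
        simp [pvGrp, hd, hc, pvEmit]
        split_ifs <;> simp
    | false =>
      rw [stepA_false m acc cur l hd]
      rw [ih]
      simp [pvGrp, hd]

-- the enumerate-filter-map of B computes pvDIdx
theorem pvEnum_dIdx (xs : List String) (s : Nat) :
    ((PySem.List.enumerate xs (s : Int)).filter (fun p => pvDelimS p.2)).map (fun p => p.1)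
      = pvDIdx xs s := by
  induction xs generalizing s with
  | nil => simp [PySem.List.enumerate_nil, pvDIdx]
  | cons x rest ih =>
    rw [PySem.List.enumerate_cons]
    have hcast : (s : Int) + 1 = ((s + 1 : Nat) : Int) := by push_cast; ring
    cases hd : pvDelimS x with
    | true =>
      rw [List.filter_cons_of_pos (by simpa using hd), List.map_cons, hcast, ih]
      simp [pvDIdx, hd]
    | false =>
      rw [List.filter_cons_of_neg (by simp [hd]), hcast, ih]
      simp [pvDIdx, hd]

-- slice extension by one element
theorem pvSlice_ext (L : List String) (p k : Nat) (hpk : p ≤ k) (hk : k < L.length) :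
    PySem.List.slice L (some ((p : Nat) : Int)) (some ((k + 1 : Nat) : Int))
      = PySem.List.slice L (some ((p : Nat) : Int)) (some ((k : Nat) : Int)) ++ [L[k]] := by
  rw [PySem.List.slice_natCast, PySem.List.slice_natCast]
  have h1 : k + 1 - p = (k - p) + 1 := by omega
  rw [h1, List.take_add_one]
  have h2 : (L.drop p)[k - p]? = some L[k] := by
    rw [List.getElem?_drop]
    have h3 : p + (k - p) = k := by omega
    rw [h3, List.getElem?_eq_getElem hk]
  rw [h2]
  rfl

-- main invariant for B's fold over the boundary list
theorem pvSegFold (L : List String) (m : Int) (xs : List String) (k p : Nat) (acc : List String)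
    (hdrop : L.drop k = xs) (hpk : p ≤ k) :
    ((pvDIdx xs k ++ [(L.length : Int)]).foldl (pvSegStep L m) (acc, ((p : Nat) : Int))).1
      = acc ++ (pvGrp (PySem.List.slice L (some ((p : Nat) : Int)) (some ((k : Nat) : Int))) xs).flatMap (pvEmit m) := by
  induction xs generalizing k p acc with
  | nil =>
    have hk : L.length ≤ k := by
      by_contra h
      have := List.drop_eq_nil_iff.mp hdrop
      omega
    have hseg : PySem.List.slice L (some ((p : Nat) : Int)) (some (L.length : Int))
        = PySem.List.slice L (some ((p : Nat) : Int)) (some ((k : Nat) : Int)) := by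
      rw [PySem.List.slice_natCast, PySem.List.slice_natCast,
        List.take_of_length_le (by rw [List.length_drop]),
        List.take_of_length_le (by rw [List.length_drop]; omega)]
    simp only [pvDIdx, List.nil_append, List.foldl_cons, List.foldl_nil, pvSegStep, hseg]
    by_cases hs : PySem.List.slice L (some ((p : Nat) : Int)) (some ((k : Nat) : Int)) = []
    · simp [pvGrp, hs]
    · simp [pvGrp, pvEmit, hs]
      split_ifs <;> simp
  | cons s rest ih =>
    have hk : k < L.length := by
      by_contra h
      rw [List.drop_eq_nil_iff.mpr (by omega)] at hdrop
      simp at hdrop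
    have hLk : L[k] = s := by
      have h0 : (L.drop k)[0]? = some s := by rw [hdrop]; rfl
      rw [List.getElem?_drop] at h0
      simpa [List.getElem?_eq_getElem hk] using h0
    have hrest : L.drop (k + 1) = rest := by
      have := congrArg List.tail hdrop
      simpa [List.tail_drop] using this
    have hcast : ((k : Nat) : Int) + 1 = ((k + 1 : Nat) : Int) := by push_cast; ring
    cases hd : pvDelimS s with
    | true =>
      rw [show pvDIdx (s :: rest) k = (k : Int) :: pvDIdx rest (k + 1) from by simp [pvDIdx, hd]]
      rw [List.cons_append, List.foldl_cons]
      have hstep : pvSegStep L m (acc, ((p : Nat) : Int)) ((k : Nat) : Int)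
          = (acc ++ (if PySem.List.slice L (some ((p : Nat) : Int)) (some ((k : Nat) : Int)) = [] then []
                     else pvEmit m (PySem.List.slice L (some ((p : Nat) : Int)) (some ((k : Nat) : Int)))),
             ((k : Nat) : Int) + 1) := by
        by_cases hseg : PySem.List.slice L (some ((p : Nat) : Int)) (some ((k : Nat) : Int)) = []
        · simp [pvSegStep, hseg]
        · simp [pvSegStep, pvEmit, hseg]
          split_ifs <;> simp
      rw [hstep, hcast]
      have hslice0 : PySem.List.slice L (some ((k + 1 : Nat) : Int)) (some ((k + 1 : Nat) : Int)) = [] := by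
        rw [PySem.List.slice_natCast]; simp
      rw [ih (k + 1) (k + 1) _ hrest (le_refl _), hslice0]
      by_cases hs : PySem.List.slice L (some ((p : Nat) : Int)) (some ((k : Nat) : Int)) = []
      · simp [pvGrp, hd, hs]
      · simp [pvGrp, hd, hs, List.append_assoc]
    | false =>
      rw [show pvDIdx (s :: rest) k = pvDIdx rest (k + 1) from by simp [pvDIdx, hd]]
      rw [ih (k + 1) p acc hrest (by omega)]
      have hext := pvSlice_ext L p k hpk hk
      rw [hLk] at hext
      rw [hext]
      simp [pvGrp, hd]

-- ===== VERDICT (by name: the statement is the Claim_ definition above) =====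
theorem extract_articles_py_spec : Claim_equal_extract_articles_py := by
  intro raw_texts min_length _
  show extract_articles_py raw_texts min_length = extract_articles_py_alt raw_texts min_length
  have hA : extract_articles_py raw_texts min_length
      = pvFlushA min_length (raw_texts.foldl (pvStepA min_length) ([], [])) := rfl
  rw [hA, pvA_grp]
  simp only [extract_articles_py_alt]
  rw [show ((0 : Int)) = ((0 : Nat) : Int) from rfl, pvEnum_dIdx]
  have h := pvSegFold (raw_texts.map PySem.Str.strip) min_length (raw_texts.map PySem.Str.strip) 0 0 [] (by simp) (le_refl 0)
  rw [show PySem.List.slice (raw_texts.map PySem.Str.strip) (some ((0 : Nat) : Int)) (some ((0 : Nat) : Int)) = [] from by rw [PySem.List.slice_natCast]; simp] at h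
  simpa using h.symm
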